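-- pv_equiv track=rewrite | github.com/devscanr/extractors | extractors/patterns.py | expand_phrase1
-- ===== SOURCE A (Python) =====
-- def expand_phrase1(phrase: str) -> list[str]:
--   if not phrase:
--     return []
--   dotequal_i, equal_i, dash_i = phrase.find(".="), phrase.find("="), phrase.find("-")
--   l = len(phrase)
--   first_cc = min(l, l, *[i for i in [dotequal_i, equal_i, dash_i] if i != -1])
--   if first_cc == dotequal_i:
--     # TODO support also "/=" ?
--     # Handling ".="s
--     head, tail = phrase[0:dotequal_i], phrase[dotequal_i + 2:]
--     tail_patterns = expand_phrase1(tail)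
--     return [
--       head + "." + pattern for pattern in tail_patterns
--     ] + [
--       head + "-" + pattern for pattern in tail_patterns
--     ] + [
--       head + " " + pattern for pattern in tail_patterns
--     ] + [
--       head + pattern for pattern in tail_patterns
--     ]
--   elif first_cc == equal_i:
--     # Handling "="s
--     head, tail = phrase[0:equal_i], phrase[equal_i + 1:]
--     tail_patterns = expand_phrase1(tail)
--     return [
--       head + "-" + pattern for pattern in tail_patterns
--     ] + [
--       head + " " + pattern for pattern in tail_patterns
--     ] + [
--       head + pattern for pattern in tail_patterns
--     ]
--   elif first_cc == dash_i:
--     # Handling "-"s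
--     head, tail = phrase[0:dash_i], phrase[dash_i + 1:]
--     tail_patterns = expand_phrase1(tail)
--     return [
--       head + "-" + pattern for pattern in tail_patterns
--     ] + [
--       head + " " + pattern for pattern in tail_patterns
--     ]
--   else:
--     return [phrase]
-- ===== SOURCE B (Python) =====
-- def expand_phrase1(phrase: str) -> list[str]:
--   # Tokenize once: split the phrase at the leftmost separator each time,
--   # recording (segment, connector options); then expand right-to-left.
--   SEPS = ((".=", (".", "-", " ", "")), ("=", ("-", " ", "")), ("-", ("-", " ")))
--   parts = []
--   s = phrase
--   while True:
--     best = None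
--     for tok, opts in SEPS:
--       i = s.find(tok)
--       if i != -1 and (best is None or i < best[0]):
--         best = (i, tok, opts)
--     if best is None:
--       break
--     i, tok, opts = best
--     parts.append((s[:i], opts))
--     s = s[i + len(tok):]
--   result = [s] if s else []
--   for seg, opts in reversed(parts):
--     result = [seg + o + p for o in opts for p in result]
--   return result
-- ===== Notes on version B (the rewrite author's own statement) =====
-- stated objective: alternative
-- what changed: A expands the phrase by direct four-way recursion at each separator; B tokenizes the phrase once into (segment, connector-options) parts with an iterative scan and then builds the combinatorial list by a single right-to-left product fold.
import Mathlib
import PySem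

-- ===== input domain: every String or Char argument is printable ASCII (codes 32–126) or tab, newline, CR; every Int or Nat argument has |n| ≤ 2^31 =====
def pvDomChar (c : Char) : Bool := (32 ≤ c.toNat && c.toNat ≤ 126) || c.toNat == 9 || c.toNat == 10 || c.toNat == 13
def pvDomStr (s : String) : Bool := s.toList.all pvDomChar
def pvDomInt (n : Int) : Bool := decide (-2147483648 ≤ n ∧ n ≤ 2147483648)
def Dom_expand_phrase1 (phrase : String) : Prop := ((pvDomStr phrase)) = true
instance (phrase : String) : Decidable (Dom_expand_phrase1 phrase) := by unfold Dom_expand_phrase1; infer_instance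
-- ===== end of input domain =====

-- B replaces A's four-way recursive expansion by a single tokenize pass followed by a
-- right-to-left product fold (objective: alternative decomposition, same cost).

-- ===== PORT A =====

-- helpers cited by the ports' termination proofs
theorem pvSliceFrom_length_lt (cs : List Char) (a : Int) (h1 : 1 ≤ a) (h2 : cs ≠ []) :
    (PySem.List.slice cs (some a) none).length < cs.length := by
  rw [PySem.List.slice_from cs (by omega : (0:Int) ≤ a)]
  have ha : 1 ≤ a.toNat := by omega
  have hc : 0 < cs.length := List.length_pos_iff.mpr h2
  simp only [List.length_drop]
  omega

theorem pvFoldlMin_lb (b : Int) (xs : List Int) (init : Int) (hi : b ≤ init)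
    (hx : ∀ x ∈ xs, b ≤ x) : b ≤ xs.foldl min init := by
  induction xs generalizing init with
  | nil => simpa using hi
  | cons h t ih =>
      simp only [List.foldl_cons]
      exact ih _ (le_min hi (hx _ (by simp))) (fun x hm => hx x (by simp [hm]))

-- nonnegativity of A's first_cc, cited by the termination proof of the port of A
theorem pvFirstCc_nonneg (cs : List Char) :
    (0:Int) ≤ ([PySem.Chars.find cs ['.', '='], PySem.Chars.find cs ['='],
        PySem.Chars.find cs ['-']].filter (fun i => !(i == -1))).foldl min
        (min (cs.length : Int) (cs.length : Int)) := by
  apply pvFoldlMin_lb _ _ _ (by omega)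
  intro x hm
  obtain ⟨hmem, hp⟩ := List.mem_filter.mp hm
  simp at hp
  have hA := PySem.Chars.neg_one_le_find cs ['.', '=']
  have hB := PySem.Chars.neg_one_le_find cs ['=']
  have hC := PySem.Chars.neg_one_le_find cs ['-']
  simp only [List.mem_cons, List.not_mem_nil, or_false] at hmem
  rcases hmem with rfl | rfl | rfl <;> omega

-- transliteration of A's recursive expansion, on the code-point list
def expandACore (cs : List Char) : List (List Char) :=
  if hne : cs = [] then []
  else
    let i1 := PySem.Chars.find cs ['.', '=']
    let i2 := PySem.Chars.find cs ['=']
    let i3 := PySem.Chars.find cs ['-']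
    let l : Int := cs.length
    let first_cc := ([i1, i2, i3].filter (fun i => !(i == -1))).foldl min (min l l)
    if h1 : first_cc == i1 then
      let head := PySem.List.slice cs (some 0) (some i1)
      let tail := PySem.List.slice cs (some (i1 + 2)) none
      let tp := expandACore tail
      (tp.map (fun p => head ++ ['.'] ++ p)) ++ (tp.map (fun p => head ++ ['-'] ++ p)) ++
      (tp.map (fun p => head ++ [' '] ++ p)) ++ (tp.map (fun p => head ++ p))
    else if h2 : first_cc == i2 then
      let head := PySem.List.slice cs (some 0) (some i2)
      let tail := PySem.List.slice cs (some (i2 + 1)) none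
      let tp := expandACore tail
      (tp.map (fun p => head ++ ['-'] ++ p)) ++ (tp.map (fun p => head ++ [' '] ++ p)) ++
      (tp.map (fun p => head ++ p))
    else if h3 : first_cc == i3 then
      let head := PySem.List.slice cs (some 0) (some i3)
      let tail := PySem.List.slice cs (some (i3 + 1)) none
      let tp := expandACore tail
      (tp.map (fun p => head ++ ['-'] ++ p)) ++ (tp.map (fun p => head ++ [' '] ++ p))
    else
      [cs]
termination_by cs.length
decreasing_by
  · refine pvSliceFrom_length_lt _ _ ?_ hne
    have hA' : (-1 : Int) ≤ i1 := PySem.Chars.neg_one_le_find cs ['.', '=']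
    omega
  · refine pvSliceFrom_length_lt _ _ ?_ hne
    have hfc' : (0 : Int) ≤ first_cc := pvFirstCc_nonneg cs
    simp only [beq_iff_eq] at h2
    omega
  · refine pvSliceFrom_length_lt _ _ ?_ hne
    have hfc' : (0 : Int) ≤ first_cc := pvFirstCc_nonneg cs
    simp only [beq_iff_eq] at h3
    omega

def expand_phrase1 (phrase : String) : List String :=
  (expandACore phrase.toList).map (fun cs => String.ofList cs)

-- ===== PORT B =====

-- the SEPS table of Source B
def pvSepTable : List (List Char × List (List Char)) :=
  [(['.', '='], [['.'], ['-'], [' '], []]),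
   (['='], [['-'], [' '], []]),
   (['-'], [['-'], [' ']])]

-- the inner 'for tok, opts in SEPS' loop of Source B: best separator (lowest index, table order on ties)
def pvFindBest (cs : List Char) : Option (Int × List Char × List (List Char)) :=
  pvSepTable.foldl (fun best p =>
    let i := PySem.Chars.find cs p.1
    if i != -1 && (match best with | none => true | some b => decide (i < b.1)) then
      some (i, p.1, p.2)
    else best) none

-- inversion fact cited by the termination proof of the port of B
theorem pvFindBest_some (cs : List Char) (i : Int) (tok : List Char) (opts : List (List Char))
    (h : pvFindBest cs = some (i, tok, opts)) : 0 ≤ i ∧ 1 ≤ tok.length := by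
  have hA := PySem.Chars.neg_one_le_find cs ['.', '=']
  have hB := PySem.Chars.neg_one_le_find cs ['=']
  have hC := PySem.Chars.neg_one_le_find cs ['-']
  revert h
  simp only [pvFindBest, pvSepTable, List.foldl]
  by_cases d1 : PySem.Chars.find cs ['.', '='] = -1 <;>
  by_cases d2 : PySem.Chars.find cs ['='] = -1 <;>
  by_cases d3 : PySem.Chars.find cs ['-'] = -1 <;>
    simp [d1, d2, d3] <;>
    (try split_ifs) <;>
    (first
      | (rintro ⟨rfl, rfl, rfl⟩; exact ⟨by omega, by decide⟩)
      | (rintro rfl rfl rfl; exact ⟨by omega, by decide⟩))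

-- the outer while loop of Source B: (parts, final segment)
def pvTokenize (cs : List Char) : List (List Char × List (List Char)) × List Char :=
  match h : pvFindBest cs with
  | none => ([], cs)
  | some (i, tok, opts) =>
      let r := pvTokenize (PySem.List.slice cs (some (i + tok.length)) none)
      ((PySem.List.slice cs (some 0) (some i), opts) :: r.1, r.2)
termination_by cs.length
decreasing_by
  have hb := pvFindBest_some cs i tok opts h
  apply pvSliceFrom_length_lt _ _ (by omega)
  intro hcs
  rw [hcs] at h
  rw [show pvFindBest [] = none from by decide] at h
  cases h

def expand_phrase1_alt (phrase : String) : List String :=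
  let r := pvTokenize phrase.toList
  let init := if r.2 = [] then [] else [r.2]
  (r.1.reverse.foldl
      (fun res p => p.2.flatMap (fun o => res.map (fun q => p.1 ++ o ++ q))) init).map
    (fun cs => String.ofList cs)

-- ===== PRECONDITION & SPEC =====
def Spec_expand_phrase1 (phrase : String) (out : List String) : Prop := out = expand_phrase1_alt phrase
instance (phrase : String) (out : List String) : Decidable (Spec_expand_phrase1 phrase out) := by unfold Spec_expand_phrase1; infer_instance

-- ===== CLAIM (what is proved, stated in full; the proofs are below) =====
def Claim_equal_expand_phrase1 : Prop := ∀ (phrase : String), Dom_expand_phrase1 phrase → Spec_expand_phrase1 phrase (expand_phrase1 phrase)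

-- ===== LEMMAS AND PROOFS =====

theorem pvFoldlMin_le_init (xs : List Int) (init : Int) : xs.foldl min init ≤ init := by
  induction xs generalizing init with
  | nil => simp
  | cons h t ih =>
      simp only [List.foldl_cons]
      exact le_trans (ih _) (min_le_left _ _)

theorem pvFoldlMin_le_mem (xs : List Int) (init x : Int) (hx : x ∈ xs) :
    xs.foldl min init ≤ x := by
  induction xs generalizing init with
  | nil => simp at hx
  | cons h t ih =>
      simp only [List.foldl_cons]
      rcases List.mem_cons.mp hx with rfl | hm
      · exact le_trans (pvFoldlMin_le_init _ _) (min_le_right _ _)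
      · exact ih _ hm

theorem pvFoldlMin_cases (xs : List Int) (init : Int) :
    xs.foldl min init = init ∨ xs.foldl min init ∈ xs := by
  induction xs generalizing init with
  | nil => simp
  | cons h t ih =>
      simp only [List.foldl_cons]
      rcases ih (min init h) with he | hm
      · rcases min_cases init h with ⟨h1, _⟩ | ⟨h1, _⟩ <;> rw [he, h1]
        · exact .inl rfl
        · exact .inr (by simp)
      · exact .inr (by simp [hm])

-- upper bound on a successful find: the needle still fits
theorem pvFind_ub (cs sub : List Char) (h : PySem.Chars.find cs sub ≠ -1) :
    PySem.Chars.find cs sub + (sub.length : Int) ≤ (cs.length : Int) := by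
  have h0 : 0 ≤ PySem.Chars.find cs sub := by
    have := PySem.Chars.neg_one_le_find cs sub; omega
  have hp := (PySem.Chars.find_spec h0).1
  have h1 := hp.length_le
  rw [List.length_drop] at h1
  have h2 := PySem.Chars.find_le_length cs sub
  omega

def pvApply (parts : List (List Char × List (List Char))) (last : List Char) : List (List Char) :=
  parts.foldr (fun p res => p.2.flatMap (fun o => res.map (fun q => p.1 ++ o ++ q)))
    (if last = [] then [] else [last])

theorem pvApply_cons (p : List Char × List (List Char))
    (ps : List (List Char × List (List Char))) (last : List Char) :
    pvApply (p :: ps) last =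
      p.2.flatMap (fun o => (pvApply ps last).map (fun q => p.1 ++ o ++ q)) := rfl

theorem pvTokenize_none (cs : List Char) (h : pvFindBest cs = none) :
    pvTokenize cs = ([], cs) := by
  rw [pvTokenize.eq_def]
  split <;> simp_all

theorem pvTokenize_some (cs : List Char) (i : Int) (tok : List Char)
    (opts : List (List Char)) (h : pvFindBest cs = some (i, tok, opts)) :
    pvTokenize cs =
      ((PySem.List.slice cs (some 0) (some i), opts) ::
        (pvTokenize (PySem.List.slice cs (some (i + tok.length)) none)).1,
       (pvTokenize (PySem.List.slice cs (some (i + tok.length)) none)).2) := by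
  rw [pvTokenize.eq_def]
  split <;> simp_all

-- evaluation of pvFindBest under the ordering facts of each branch of A
theorem pvPick1 (cs : List Char)
    (e1 : PySem.Chars.find cs ['.', '='] ≠ -1)
    (c2 : ¬(PySem.Chars.find cs ['='] ≠ -1 ∧
        PySem.Chars.find cs ['='] < PySem.Chars.find cs ['.', '=']))
    (c3 : ¬(PySem.Chars.find cs ['-'] ≠ -1 ∧
        PySem.Chars.find cs ['-'] < PySem.Chars.find cs ['.', '='])) :
    pvFindBest cs = some (PySem.Chars.find cs ['.', '='], ['.', '='],
      [['.'], ['-'], [' '], []]) := by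
  simp only [pvFindBest, pvSepTable, List.foldl]
  have h2 : (PySem.Chars.find cs ['='] != -1 &&
      decide (PySem.Chars.find cs ['='] < PySem.Chars.find cs ['.', '='])) = false := by
    by_cases d : PySem.Chars.find cs ['='] = -1
    · rw [d]; simp
    · have hno : ¬ PySem.Chars.find cs ['='] < PySem.Chars.find cs ['.', '='] :=
        fun hlt => c2 ⟨d, hlt⟩
      simp [hno]
  have h3 : (PySem.Chars.find cs ['-'] != -1 &&
      decide (PySem.Chars.find cs ['-'] < PySem.Chars.find cs ['.', '='])) = false := by
    by_cases d : PySem.Chars.find cs ['-'] = -1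
    · rw [d]; simp
    · have hno : ¬ PySem.Chars.find cs ['-'] < PySem.Chars.find cs ['.', '='] :=
        fun hlt => c3 ⟨d, hlt⟩
      simp [hno]
  simp [e1, h2, h3]

theorem pvPick2 (cs : List Char)
    (e2 : PySem.Chars.find cs ['='] ≠ -1)
    (c1 : PySem.Chars.find cs ['.', '='] ≠ -1 →
        PySem.Chars.find cs ['='] < PySem.Chars.find cs ['.', '='])
    (c3 : ¬(PySem.Chars.find cs ['-'] ≠ -1 ∧
        PySem.Chars.find cs ['-'] < PySem.Chars.find cs ['='])) :
    pvFindBest cs = some (PySem.Chars.find cs ['='], ['='], [['-'], [' '], []]) := by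
  simp only [pvFindBest, pvSepTable, List.foldl]
  have h3 : (PySem.Chars.find cs ['-'] != -1 &&
      decide (PySem.Chars.find cs ['-'] < PySem.Chars.find cs ['='])) = false := by
    by_cases d : PySem.Chars.find cs ['-'] = -1
    · rw [d]; simp
    · have hno : ¬ PySem.Chars.find cs ['-'] < PySem.Chars.find cs ['='] :=
        fun hlt => c3 ⟨d, hlt⟩
      simp [hno]
  by_cases d1 : PySem.Chars.find cs ['.', '='] = -1
  · simp [d1, e2, h3]
  · simp [d1, e2, c1 d1, h3]

theorem pvPick3 (cs : List Char)
    (e3 : PySem.Chars.find cs ['-'] ≠ -1)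
    (c1 : PySem.Chars.find cs ['.', '='] ≠ -1 →
        PySem.Chars.find cs ['-'] < PySem.Chars.find cs ['.', '='])
    (c2 : PySem.Chars.find cs ['='] ≠ -1 →
        PySem.Chars.find cs ['-'] < PySem.Chars.find cs ['=']) :
    pvFindBest cs = some (PySem.Chars.find cs ['-'], ['-'], [['-'], [' ']]) := by
  simp only [pvFindBest, pvSepTable, List.foldl]
  by_cases d1 : PySem.Chars.find cs ['.', '='] = -1 <;>
  by_cases d2 : PySem.Chars.find cs ['='] = -1
  · simp [d1, d2, e3]
  · simp [d1, d2, e3, c2 d2]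
  · simp [d1, d2, e3, c1 d1]
  · have t1 := c1 d1
    have t2 := c2 d2
    simp [d1, d2, e3]
    split_ifs <;> simp [t1, t2]

theorem pvPickNone (cs : List Char)
    (d1 : PySem.Chars.find cs ['.', '='] = -1)
    (d2 : PySem.Chars.find cs ['='] = -1)
    (d3 : PySem.Chars.find cs ['-'] = -1) :
    pvFindBest cs = none := by
  simp [pvFindBest, pvSepTable, List.foldl, d1, d2, d3]

theorem core_eq_nil : expandACore [] = pvApply (pvTokenize []).1 (pvTokenize []).2 := by
  rw [pvTokenize_none [] (by decide)]
  rw [expandACore.eq_def]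
  simp [pvApply]

theorem core_eq_aux (n : Nat) : ∀ (cs : List Char), cs.length ≤ n →
    expandACore cs = pvApply (pvTokenize cs).1 (pvTokenize cs).2 := by
  induction n with
  | zero =>
      intro cs hlen
      have : cs = [] := List.length_eq_zero_iff.mp (Nat.le_zero.mp hlen)
      subst this
      exact core_eq_nil
  | succ n ihn =>
      intro cs hlen
      by_cases hcs : cs = []
      · subst hcs; exact core_eq_nil
      rw [expandACore.eq_def, dif_neg hcs]
      have hA := PySem.Chars.neg_one_le_find cs ['.', '=']
      have hB := PySem.Chars.neg_one_le_find cs ['=']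
      have hC := PySem.Chars.neg_one_le_find cs ['-']
      have hU1 : PySem.Chars.find cs ['.', '='] ≠ -1 →
          PySem.Chars.find cs ['.', '='] + 2 ≤ (cs.length : Int) := fun h => by
        have := pvFind_ub cs ['.', '='] h; simpa using this
      have hU2 : PySem.Chars.find cs ['='] ≠ -1 →
          PySem.Chars.find cs ['='] + 1 ≤ (cs.length : Int) := fun h => by
        have := pvFind_ub cs ['='] h; simpa using this
      have hU3 : PySem.Chars.find cs ['-'] ≠ -1 →
          PySem.Chars.find cs ['-'] + 1 ≤ (cs.length : Int) := fun h => by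
        have := pvFind_ub cs ['-'] h; simpa using this
      have hL : 0 < cs.length := List.length_pos_iff.mpr hcs
      have hFC0 := pvFirstCc_nonneg cs
      have hle1 : PySem.Chars.find cs ['.', '='] ≠ -1 →
          ([PySem.Chars.find cs ['.', '='], PySem.Chars.find cs ['='],
            PySem.Chars.find cs ['-']].filter (fun i => !(i == -1))).foldl min
            (min (cs.length : Int) (cs.length : Int)) ≤ PySem.Chars.find cs ['.', '='] :=
        fun h => pvFoldlMin_le_mem _ _ _ (by simp [List.mem_filter, h])
      have hle2 : PySem.Chars.find cs ['='] ≠ -1 →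
          ([PySem.Chars.find cs ['.', '='], PySem.Chars.find cs ['='],
            PySem.Chars.find cs ['-']].filter (fun i => !(i == -1))).foldl min
            (min (cs.length : Int) (cs.length : Int)) ≤ PySem.Chars.find cs ['='] :=
        fun h => pvFoldlMin_le_mem _ _ _ (by simp [List.mem_filter, h])
      have hle3 : PySem.Chars.find cs ['-'] ≠ -1 →
          ([PySem.Chars.find cs ['.', '='], PySem.Chars.find cs ['='],
            PySem.Chars.find cs ['-']].filter (fun i => !(i == -1))).foldl min
            (min (cs.length : Int) (cs.length : Int)) ≤ PySem.Chars.find cs ['-'] :=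
        fun h => pvFoldlMin_le_mem _ _ _ (by simp [List.mem_filter, h])
      have hAll : ([PySem.Chars.find cs ['.', '='], PySem.Chars.find cs ['='],
            PySem.Chars.find cs ['-']].filter (fun i => !(i == -1))).foldl min
            (min (cs.length : Int) (cs.length : Int)) = (cs.length : Int) ∨
          (([PySem.Chars.find cs ['.', '='], PySem.Chars.find cs ['='],
            PySem.Chars.find cs ['-']].filter (fun i => !(i == -1))).foldl min
            (min (cs.length : Int) (cs.length : Int)) = PySem.Chars.find cs ['.', '='] ∨
           ([PySem.Chars.find cs ['.', '='], PySem.Chars.find cs ['='],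
            PySem.Chars.find cs ['-']].filter (fun i => !(i == -1))).foldl min
            (min (cs.length : Int) (cs.length : Int)) = PySem.Chars.find cs ['='] ∨
           ([PySem.Chars.find cs ['.', '='], PySem.Chars.find cs ['='],
            PySem.Chars.find cs ['-']].filter (fun i => !(i == -1))).foldl min
            (min (cs.length : Int) (cs.length : Int)) = PySem.Chars.find cs ['-']) := by
        rcases pvFoldlMin_cases ([PySem.Chars.find cs ['.', '='], PySem.Chars.find cs ['='],
            PySem.Chars.find cs ['-']].filter (fun i => !(i == -1)))
            (min (cs.length : Int) (cs.length : Int)) with h | h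
        · left; rw [h, min_self]
        · right; simpa using (List.mem_filter.mp h).1
      dsimp only
      split_ifs with h1 h2 h3
      · -- ".=" branch
        simp only [beq_iff_eq] at h1
        have e1 : PySem.Chars.find cs ['.', '='] ≠ -1 := by omega
        have hfb := pvPick1 cs e1
          (by rintro ⟨h, hlt⟩; have := hle2 h; omega)
          (by rintro ⟨h, hlt⟩; have := hle3 h; omega)
        rw [pvTokenize_some cs _ _ _ hfb]
        dsimp only
        rw [pvApply_cons]
        dsimp only
        have htl : PySem.List.slice cs
            (some (PySem.Chars.find cs ['.', '='] + ((['.', '='] : List Char).length : Int)))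
            none = PySem.List.slice cs (some (PySem.Chars.find cs ['.', '='] + 2)) none := by
          norm_num
        rw [htl]
        have hlt : (PySem.List.slice cs
            (some (PySem.Chars.find cs ['.', '='] + 2)) none).length < cs.length :=
          pvSliceFrom_length_lt cs _ (by omega) hcs
        rw [← ihn _ (by omega)]
        simp [List.flatMap_cons, List.append_assoc]
      · -- "=" branch
        simp only [beq_iff_eq] at h1 h2
        have e2 : PySem.Chars.find cs ['='] ≠ -1 := by omega
        have hfb := pvPick2 cs e2
          (fun h => by have := hle1 h; omega)
          (by rintro ⟨h, hlt⟩; have := hle3 h; omega)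
        rw [pvTokenize_some cs _ _ _ hfb]
        dsimp only
        rw [pvApply_cons]
        dsimp only
        have htl : PySem.List.slice cs
            (some (PySem.Chars.find cs ['='] + ((['='] : List Char).length : Int)))
            none = PySem.List.slice cs (some (PySem.Chars.find cs ['='] + 1)) none := by
          norm_num
        rw [htl]
        have hlt : (PySem.List.slice cs
            (some (PySem.Chars.find cs ['='] + 1)) none).length < cs.length :=
          pvSliceFrom_length_lt cs _ (by omega) hcs
        rw [← ihn _ (by omega)]
        simp [List.flatMap_cons, List.append_assoc]
      · -- "-" branch
        simp only [beq_iff_eq] at h1 h2 h3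
        have e3 : PySem.Chars.find cs ['-'] ≠ -1 := by omega
        have hfb := pvPick3 cs e3
          (fun h => by have := hle1 h; omega)
          (fun h => by have := hle2 h; omega)
        rw [pvTokenize_some cs _ _ _ hfb]
        dsimp only
        rw [pvApply_cons]
        dsimp only
        have htl : PySem.List.slice cs
            (some (PySem.Chars.find cs ['-'] + ((['-'] : List Char).length : Int)))
            none = PySem.List.slice cs (some (PySem.Chars.find cs ['-'] + 1)) none := by
          norm_num
        rw [htl]
        have hlt : (PySem.List.slice cs
            (some (PySem.Chars.find cs ['-'] + 1)) none).length < cs.length :=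
          pvSliceFrom_length_lt cs _ (by omega) hcs
        rw [← ihn _ (by omega)]
        simp [List.flatMap_cons, List.append_assoc]
      · -- no separator branch
        simp only [beq_iff_eq] at h1 h2 h3
        have d1 : PySem.Chars.find cs ['.', '='] = -1 := by
          by_contra dk
          have := hle1 dk
          have := hU1 dk
          rcases hAll with hE | hE | hE | hE <;> omega
        have d2 : PySem.Chars.find cs ['='] = -1 := by
          by_contra dk
          have := hle2 dk
          have := hU2 dk
          rcases hAll with hE | hE | hE | hE <;> omega
        have d3 : PySem.Chars.find cs ['-'] = -1 := by
          by_contra dk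
          have := hle3 dk
          have := hU3 dk
          rcases hAll with hE | hE | hE | hE <;> omega
        rw [pvTokenize_none cs (pvPickNone cs d1 d2 d3)]
        simp [pvApply, hcs]

theorem core_eq (cs : List Char) :
    expandACore cs = pvApply (pvTokenize cs).1 (pvTokenize cs).2 :=
  core_eq_aux cs.length cs le_rfl

theorem alt_eq (phrase : String) :
    expand_phrase1_alt phrase =
      (pvApply (pvTokenize phrase.toList).1 (pvTokenize phrase.toList).2).map
        (fun cs => String.ofList cs) := by
  show (List.foldl (fun res p => p.2.flatMap (fun o => res.map (fun q => p.1 ++ o ++ q)))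
      (if (pvTokenize phrase.toList).2 = [] then [] else [(pvTokenize phrase.toList).2])
      (pvTokenize phrase.toList).1.reverse).map (fun cs => String.ofList cs) = _
  rw [List.foldl_reverse]
  rfl

-- ===== VERDICT (by name: the statement is the Claim_ definition above) =====
theorem expand_phrase1_spec : Claim_equal_expand_phrase1 := by
  intro phrase _
  unfold Spec_expand_phrase1
  rw [alt_eq, ← core_eq]
  rfl
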